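-- pv_equiv track=rewrite | github.com/michalsieron/computer_architecture_project | benches/mult.py | normalized_bits_to_denormalized_bits
-- ===== SOURCE A (Python) =====
-- def normalized_bits_to_denormalized_bits(bits):
--     s, e, f = bits[0], bits[1:9], bits[9:]
--     if any(e):
--         e_bin = ''.join(map(str, e))
--         new_e_int = int(e_bin, 2) - 1
--         new_e_bin = bin(new_e_int)[2:].zfill(8)
--         e = [int(b) for b in new_e_bin]
--
--         f = [1, *f][:-1]
--
--     return [s, *e, *f]
-- ===== SOURCE B (Python) =====
-- def _borrow(r):
--     # decrement a reversed bit list by ripple borrow: flip the trailing zeros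
--     # (leading in r) to ones until the first set bit, which the borrow clears;
--     # the caller's any(e) guard promises a set bit in a well-formed bit list
--     if r[0] == 1:
--         return [0] + r[1:]
--     return [1] + _borrow(r[1:])
--
--
-- def normalized_bits_to_denormalized_bits(bits):
--     s, e, f = bits[0], bits[1:9], bits[9:]
--     if any(e):
--         e = _borrow(e[::-1])[::-1]
--         e = [0] * (8 - len(e)) + e      # canonical 8-bit exponent field
--         f = [1, *f][:-1]
--     return [s, *e, *f]
-- ===== Notes on version B (the rewrite author's own statement) =====
-- stated objective: alternative
-- what changed: A decrements the exponent by round-tripping through strings (join the digits, int(.,2)-1, bin, zfill(8), re-parse each char); B decrements the exponent bits themselves by a recursive ripple borrow from the least-significant end (flip trailing zeros, clear the first set bit) and left-pads with zeros to the canonical 8-bit field.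
-- outside the precondition, e.g. on normalized_bits_to_denormalized_bits([0, 10]): A returns [0, 0, 0, 0, 0, 0, 0, 0, 1], B raises IndexError
import Mathlib
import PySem

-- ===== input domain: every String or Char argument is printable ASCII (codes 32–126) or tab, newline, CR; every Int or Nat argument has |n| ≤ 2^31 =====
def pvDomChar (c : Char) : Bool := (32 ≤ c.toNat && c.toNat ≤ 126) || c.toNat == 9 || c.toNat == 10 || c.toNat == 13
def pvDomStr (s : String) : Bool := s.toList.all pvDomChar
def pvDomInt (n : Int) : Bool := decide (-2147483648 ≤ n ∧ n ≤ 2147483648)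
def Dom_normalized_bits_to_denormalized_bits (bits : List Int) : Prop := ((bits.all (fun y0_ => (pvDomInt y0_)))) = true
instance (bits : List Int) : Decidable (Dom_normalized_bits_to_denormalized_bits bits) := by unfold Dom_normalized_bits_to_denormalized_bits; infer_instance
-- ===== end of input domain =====

-- B replaces A's string round-trip (join digits, int(·,2)-1, bin, zfill(8), re-parse) by a
-- recursive ripple-borrow decrement on the exponent bits, left-padded with zeros to the
-- 8-bit field (objective: alternative algorithm, same result).

-- ===== PORT A =====
-- the exponent transformation of A's then-branch, kept as a helper
def pvAexp (e : List Int) : List Int :=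
  -- e_bin = ''.join(map(str, e))
  let e_bin := PySem.Str.join "" (e.map PySem.Int.toStr)
  -- new_e_int = int(e_bin, 2) - 1   (ValueError = none; Pre_ keeps the digits binary)
  let new_e_int := (PySem.Int.ofStrBase? e_bin 2).getD 0 - 1
  -- new_e_bin = bin(new_e_int)[2:].zfill(8)
  let new_e_bin := PySem.Str.zfill (PySem.Str.slice (PySem.Int.pyBin new_e_int) (some 2) none) 8
  -- [int(b) for b in new_e_bin]   (int of a one-char string)
  new_e_bin.toList.map (fun c => (PySem.Int.ofChars? [c]).getD 0)

def normalized_bits_to_denormalized_bits (bits : List Int) : List Int :=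
  let s := PySem.List.pyGetD bits 0 0          -- bits[0]; IndexError on [] is outside Pre_
  let e := PySem.List.slice bits (some 1) (some 9)
  let f := PySem.List.slice bits (some 9) none
  if e.any (fun b => b ≠ 0) then               -- any(e)
    let e' := pvAexp e
    let f' := PySem.List.slice ((1 : Int) :: f) none (some (-1))   -- [1, *f][:-1]
    s :: (e' ++ f')                            -- [s, *e, *f]
  else
    s :: (e ++ f)

-- ===== PORT B =====
-- _borrow(r): decrement a reversed bit list; r[0] on [] is an IndexError in Python
-- (no set bit found), unreachable under Pre_'s 0/1 exponent with the any(e) guard,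
-- so the [] case is a nominal base case only
def pvBorrow : List Int → List Int
  | [] => []
  | b :: rest => if b = 1 then 0 :: rest else 1 :: pvBorrow rest

-- B's then-branch: e = _borrow(e[::-1])[::-1]; e = [0] * (8 - len(e)) + e
def pvBexp (e : List Int) : List Int :=
  let r := (PySem.List.slice? e none none (-1)).getD []              -- e[::-1]
  let e1 := (PySem.List.slice? (pvBorrow r) none none (-1)).getD []  -- _borrow(r)[::-1]
  List.replicate (8 - e1.length) 0 ++ e1                             -- [0]*(8-len(e)) + e

def normalized_bits_to_denormalized_bits_alt (bits : List Int) : List Int :=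
  let s := PySem.List.pyGetD bits 0 0          -- bits[0]; IndexError on [] is outside Pre_
  let e := PySem.List.slice bits (some 1) (some 9)
  let f := PySem.List.slice bits (some 9) none
  if e.any (fun b => b ≠ 0) then               -- any(e)
    let e' := pvBexp e
    let f' := PySem.List.slice ((1 : Int) :: f) none (some (-1))   -- [1, *f][:-1]
    s :: (e' ++ f')
  else
    s :: (e ++ f)

-- ===== PRECONDITION & SPEC =====
-- Pre_ restricts to the natural domain: bits nonempty (A raises IndexError on []) and the
-- exponent slice bits[1:9] made of actual bits 0/1: on other nonzero exponent entries A
-- usually raises ValueError, except when every decimal digit of every entry is 0 or 1,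
-- where A's string concatenation accidentally glues the decimal digits into one binary
-- numeral (see the cites in claim.json).
def Pre_normalized_bits_to_denormalized_bits (bits : List Int) : Prop :=
  bits ≠ [] ∧ ∀ b ∈ (bits.drop 1).take 8, b = 0 ∨ b = 1
instance (bits : List Int) : Decidable (Pre_normalized_bits_to_denormalized_bits bits) := by
  unfold Pre_normalized_bits_to_denormalized_bits; infer_instance

def pvWitness_normalized_bits_to_denormalized_bits : List Int := [0, 1, 0, 0, 0, 0, 0, 0, 1, 1]

def Spec_normalized_bits_to_denormalized_bits (bits : List Int) (out : List Int) : Prop :=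
  out = normalized_bits_to_denormalized_bits_alt bits
instance (bits : List Int) (out : List Int) : Decidable (Spec_normalized_bits_to_denormalized_bits bits out) := by
  unfold Spec_normalized_bits_to_denormalized_bits; infer_instance

-- ===== CLAIM (what is proved, stated in full; the proofs are below) =====
def Claim_equal_normalized_bits_to_denormalized_bits : Prop :=
  ∀ (bits : List Int), Dom_normalized_bits_to_denormalized_bits bits →
    Pre_normalized_bits_to_denormalized_bits bits →
    Spec_normalized_bits_to_denormalized_bits bits (normalized_bits_to_denormalized_bits bits)

-- ===== LEMMAS AND PROOFS =====

-- the two exponent transforms agree on every bit vector of length ≤ 8 with a set bit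
set_option maxHeartbeats 8000000 in
lemma pvExp_eq (e : List Int) (hlen : e.length ≤ 8) (hbit : ∀ b ∈ e, b = 0 ∨ b = 1)
    (hnz : ∃ b ∈ e, b ≠ 0) :
    pvAexp e = pvBexp e := by
  match e with
  | [] => simp at hnz
  | [b0] =>
    have h0 := hbit b0 (by simp)
    rcases h0 with rfl | rfl <;> (revert hnz; decide)
  | [b0,b1] =>
    have h0 := hbit b0 (by simp)
    have h1 := hbit b1 (by simp)
    rcases h0 with rfl | rfl <;>
    rcases h1 with rfl | rfl <;> (revert hnz; decide)
  | [b0,b1,b2] =>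
    have h0 := hbit b0 (by simp)
    have h1 := hbit b1 (by simp)
    have h2 := hbit b2 (by simp)
    rcases h0 with rfl | rfl <;>
    rcases h1 with rfl | rfl <;>
    rcases h2 with rfl | rfl <;> (revert hnz; decide)
  | [b0,b1,b2,b3] =>
    have h0 := hbit b0 (by simp)
    have h1 := hbit b1 (by simp)
    have h2 := hbit b2 (by simp)
    have h3 := hbit b3 (by simp)
    rcases h0 with rfl | rfl <;>
    rcases h1 with rfl | rfl <;>
    rcases h2 with rfl | rfl <;>
    rcases h3 with rfl | rfl <;> (revert hnz; decide)
  | [b0,b1,b2,b3,b4] =>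
    have h0 := hbit b0 (by simp)
    have h1 := hbit b1 (by simp)
    have h2 := hbit b2 (by simp)
    have h3 := hbit b3 (by simp)
    have h4 := hbit b4 (by simp)
    rcases h0 with rfl | rfl <;>
    rcases h1 with rfl | rfl <;>
    rcases h2 with rfl | rfl <;>
    rcases h3 with rfl | rfl <;>
    rcases h4 with rfl | rfl <;> (revert hnz; decide)
  | [b0,b1,b2,b3,b4,b5] =>
    have h0 := hbit b0 (by simp)
    have h1 := hbit b1 (by simp)
    have h2 := hbit b2 (by simp)
    have h3 := hbit b3 (by simp)
    have h4 := hbit b4 (by simp)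
    have h5 := hbit b5 (by simp)
    rcases h0 with rfl | rfl <;>
    rcases h1 with rfl | rfl <;>
    rcases h2 with rfl | rfl <;>
    rcases h3 with rfl | rfl <;>
    rcases h4 with rfl | rfl <;>
    rcases h5 with rfl | rfl <;> (revert hnz; decide)
  | [b0,b1,b2,b3,b4,b5,b6] =>
    have h0 := hbit b0 (by simp)
    have h1 := hbit b1 (by simp)
    have h2 := hbit b2 (by simp)
    have h3 := hbit b3 (by simp)
    have h4 := hbit b4 (by simp)
    have h5 := hbit b5 (by simp)
    have h6 := hbit b6 (by simp)
    rcases h0 with rfl | rfl <;>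
    rcases h1 with rfl | rfl <;>
    rcases h2 with rfl | rfl <;>
    rcases h3 with rfl | rfl <;>
    rcases h4 with rfl | rfl <;>
    rcases h5 with rfl | rfl <;>
    rcases h6 with rfl | rfl <;> (revert hnz; decide)
  | [b0,b1,b2,b3,b4,b5,b6,b7] =>
    have h0 := hbit b0 (by simp)
    have h1 := hbit b1 (by simp)
    have h2 := hbit b2 (by simp)
    have h3 := hbit b3 (by simp)
    have h4 := hbit b4 (by simp)
    have h5 := hbit b5 (by simp)
    have h6 := hbit b6 (by simp)
    have h7 := hbit b7 (by simp)
    rcases h0 with rfl | rfl <;>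
    rcases h1 with rfl | rfl <;>
    rcases h2 with rfl | rfl <;>
    rcases h3 with rfl | rfl <;>
    rcases h4 with rfl | rfl <;>
    rcases h5 with rfl | rfl <;>
    rcases h6 with rfl | rfl <;>
    rcases h7 with rfl | rfl <;> (revert hnz; decide)
  | b0 :: b1 :: b2 :: b3 :: b4 :: b5 :: b6 :: b7 :: b8 :: rest =>
    simp at hlen
    omega

lemma pvSlice19 (bits : List Int) :
    PySem.List.slice bits (some 1) (some 9) = (bits.drop 1).take 8 := by
  have := PySem.List.slice_natCast (xs := bits) (a := 1) (b := 9)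
  simpa using this

theorem normalized_bits_to_denormalized_bits_spec : Claim_equal_normalized_bits_to_denormalized_bits := by
  intro bits _ hPre
  unfold Spec_normalized_bits_to_denormalized_bits
  unfold normalized_bits_to_denormalized_bits normalized_bits_to_denormalized_bits_alt
  dsimp only
  split_ifs with hg
  · have hnz : ∃ b ∈ PySem.List.slice bits (some 1) (some 9), b ≠ 0 := by simpa using hg
    have hlen : (PySem.List.slice bits (some 1) (some 9)).length ≤ 8 := by
      rw [pvSlice19]
      simp [List.length_take]
    have hbit : ∀ b ∈ PySem.List.slice bits (some 1) (some 9), b = 0 ∨ b = 1 := by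
      intro b hb
      exact hPre.2 b (by rwa [pvSlice19] at hb)
    rw [pvExp_eq _ hlen hbit hnz]
  · rfl
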